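-- pv_equiv track=rewrite | github.com/Narges1989/PythonProjects | src/py104/task8.py | task8
-- ===== SOURCE A (Python) =====
-- def task8(items: list[int]) -> list[int]:
--     items = list(set(items))
--     Max = items[0]
--     result = []
--     iteration = 1
--     while (iteration<4):
--         for number in items:
--             if number>Max:
--                 Max = number
--         if Max in items:
--             items.remove(Max)
--             result.append(Max)
--         if items != []:
--             Max = items[0]
--         iteration += 1
--
--     return result[::-1]
-- ===== SOURCE B (Python) =====
-- def task8(items: list[int]) -> list[int]:
--     return sorted(set(items))[-3:]
-- ===== Notes on version B (the rewrite author's own statement) =====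
-- stated objective: simpler
-- what changed: Replaced A's three max-find-and-remove scans over a mutating dedup list with a one-liner: sort the distinct values and take the last three.
import Mathlib
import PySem

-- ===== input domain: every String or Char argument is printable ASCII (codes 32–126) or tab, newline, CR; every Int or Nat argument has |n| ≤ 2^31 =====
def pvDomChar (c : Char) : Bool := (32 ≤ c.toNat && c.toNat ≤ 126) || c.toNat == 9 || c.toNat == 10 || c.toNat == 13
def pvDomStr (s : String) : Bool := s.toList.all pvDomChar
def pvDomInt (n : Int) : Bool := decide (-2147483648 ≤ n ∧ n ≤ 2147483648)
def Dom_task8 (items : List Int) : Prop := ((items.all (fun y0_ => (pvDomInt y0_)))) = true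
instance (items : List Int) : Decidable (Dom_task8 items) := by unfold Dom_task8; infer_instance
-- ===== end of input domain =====

-- B replaces A's three max-find-and-remove scans with sorted(set(items))[-3:]; objective: simpler.

-- ===== PORT A =====
-- 'if number > Max: Max = number', one fold step
def pyMaxStep (m x : Int) : Int := if x > m then x else m

-- the while loop, state (items, Max, result), fuel = remaining iterations (3 at the top)
def task8Loop : Nat → List Int → Int → List Int → List Int
  | 0, _, _, res => res
  | n + 1, its, M, res =>
    let M1 := its.foldl pyMaxStep M
    -- 'if Max in items: items.remove(Max); result.append(Max)' — remove of a member is List.erase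
    let p := if M1 ∈ its then (its.erase M1, res ++ [M1]) else (its, res)
    -- 'if items != []: Max = items[0]'
    let M2 := match p.1 with | [] => M1 | x :: _ => x
    task8Loop n p.1 M2 p.2

def task8 (items : List Int) : List Int :=
  -- items = list(set(items)); Max = items[0] raises IndexError on [] (outside Pre_); result[::-1] = reverse
  match PySem.List.pyGet? (PySem.Set.ofList items) 0 with
  | none => []
  | some m0 => (task8Loop 3 (PySem.Set.ofList items) m0 []).reverse

-- ===== PORT B =====
def task8_alt (items : List Int) : List Int :=
  PySem.List.slice (PySem.List.sorted (PySem.Set.ofList items) (fun x => x) false) (some (-3)) none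

-- ===== PRECONDITION & SPEC =====
-- A raises IndexError on the empty list (items[0] after dedup); that is the only exclusion (B returns [] there).
def Pre_task8 (items : List Int) : Prop := items ≠ []
instance (items : List Int) : Decidable (Pre_task8 items) := by unfold Pre_task8; infer_instance
def pvWitness_task8 : List Int := ([3, 1, 2, 3, 9, 9, 7])

def Spec_task8 (items : List Int) (out : List Int) : Prop := out = task8_alt items
instance (items : List Int) (out : List Int) : Decidable (Spec_task8 items out) := by unfold Spec_task8; infer_instance

-- ===== CLAIM (what is proved, stated in full; the proofs are below) =====
def Claim_equal_task8 : Prop := ∀ (items : List Int), Dom_task8 items → Pre_task8 items → Spec_task8 items (task8 items)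

-- ===== LEMMAS AND PROOFS =====

lemma pyMaxStep_eq_max (m x : Int) : pyMaxStep m x = max m x := by
  simp only [pyMaxStep, max_def]; split_ifs <;> omega

lemma foldl_pyMaxStep (l : List Int) (M : Int) : l.foldl pyMaxStep M = l.foldl max M := by
  induction l generalizing M with
  | nil => rfl
  | cons x t ih => simp [List.foldl, pyMaxStep_eq_max, ih]

-- sorting a nodup list whose maximum is M puts M (alone) at the end
lemma sorted_erase_max (l : List Int) (M : Int) (hnd : l.Nodup) (hM : M ∈ l)
    (hmax : ∀ y ∈ l, y ≤ M) :
    PySem.List.sorted l (fun x => x) false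
      = PySem.List.sorted (l.erase M) (fun x => x) false ++ [M] := by
  apply PySem.List.sorted_eq_of_perm_of_pairwise_lt
  · have h1 : (PySem.List.sorted (l.erase M) (fun x => x) false).Perm (l.erase M) :=
      PySem.List.sorted_perm _ _ _
    exact (h1.append_right [M]).trans
      ((List.perm_append_singleton M (l.erase M)).trans (List.perm_cons_erase hM).symm)
  · rw [List.pairwise_append]
    refine ⟨?_, List.pairwise_singleton _ _, ?_⟩
    · have hle := PySem.List.sorted_pairwise (l.erase M) (fun x => x)
      have hnd' : (PySem.List.sorted (l.erase M) (fun x => x) false).Nodup :=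
        (PySem.List.sorted_perm _ _ _).nodup_iff.mpr (hnd.erase M)
      exact (hle.and hnd').imp (fun h => lt_of_le_of_ne h.1 h.2)
    · intro x hx y hy
      rw [List.mem_singleton] at hy; subst hy
      rw [PySem.List.mem_sorted] at hx
      rcases (List.Nodup.mem_erase_iff hnd).mp hx with ⟨hne, hmem⟩
      exact lt_of_le_of_ne (hmax x hmem) hne

lemma task8Loop_nil (n : Nat) (M : Int) (res : List Int) : task8Loop n [] M res = res := by
  induction n with
  | zero => rfl
  | succ k ih => simp [task8Loop, ih]

lemma task8Loop_spec (n : Nat) (l : List Int) (M : Int) (res : List Int)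
    (hnd : l.Nodup) (hM : M ∈ l) :
    task8Loop n l M res
      = res ++ ((PySem.List.sorted l (fun x => x) false).drop (l.length - n)).reverse := by
  induction n generalizing l M res with
  | zero =>
    simp [task8Loop, List.drop_eq_nil_of_le, PySem.List.length_sorted]
  | succ k ih =>
    have hM1max := PySem.List.le_foldl_max l M
    have hM1mem : l.foldl max M ∈ l := by
      rcases PySem.List.foldl_max_mem l M with h | h
      · rw [h]; exact hM
      · exact h
    have hsort := sorted_erase_max l (l.foldl max M) hnd hM1mem hM1max.2
    have hlen : (l.erase (l.foldl max M)).length + 1 = l.length :=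
      List.length_erase_add_one hM1mem
    rw [task8Loop]
    simp only [foldl_pyMaxStep, if_pos hM1mem]
    rcases he : l.erase (l.foldl max M) with _ | ⟨x, t⟩
    · -- one distinct element left: l = [foldl max M l]
      have hl : l = [l.foldl max M] := by
        have := List.perm_cons_erase hM1mem
        rw [he] at this
        exact List.perm_singleton.mp this
      rw [task8Loop_nil]
      rw [hsort, he]
      have h0 : PySem.List.sorted ([] : List Int) (fun x => x) false = [] := rfl
      have hl1 : l.length = 1 := by rw [← hlen, he]; simp
      simp [h0, hl1]
    · have hxm : x ∈ l.erase (l.foldl max M) := by rw [he]; exact List.mem_cons_self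
      have := ih (l.erase (l.foldl max M)) x (res ++ [l.foldl max M]) (hnd.erase _) hxm
      rw [he] at this
      rw [this, hsort, ← he, ← hlen]
      have hk : (l.erase (l.foldl max M)).length - k
          ≤ (PySem.List.sorted (l.erase (l.foldl max M)) (fun x => x) false).length := by
        rw [PySem.List.length_sorted]; omega
      rw [show (l.erase (l.foldl max M)).length + 1 - (k + 1)
            = (l.erase (l.foldl max M)).length - k from by omega]
      rw [List.drop_append_of_le_length hk]
      simp

lemma task8_alt_drop (items : List Int) :
    task8_alt items
      = (PySem.List.sorted (PySem.Set.ofList items) (fun x => x) false).drop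
          ((PySem.Set.ofList items : List Int).length - 3) := by
  unfold task8_alt
  rw [PySem.List.slice_from_neg_ofNat _ 3 (by omega), PySem.List.length_sorted]

-- ===== VERDICT (by name: the statement is the Claim_ definition above) =====
theorem task8_spec : Claim_equal_task8 := by
  intro items _ hpre
  unfold Spec_task8 task8
  rcases he : PySem.Set.ofList items with _ | ⟨x, t⟩
  · exfalso
    rcases List.exists_mem_of_ne_nil items hpre with ⟨y, hy⟩
    have : y ∈ PySem.Set.ofList items := (PySem.Set.mem_ofList _ _).mpr hy
    simp [he] at this
  · have hnd : (x :: t).Nodup := he ▸ PySem.Set.nodup_ofList items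
    have hget : PySem.List.pyGet? (x :: t) (0 : Int) = some x := by
      simp [PySem.List.pyGet?, PySem.List.pyIdx?]
    rw [hget]
    show (task8Loop 3 (x :: t) x []).reverse = task8_alt items
    rw [task8Loop_spec 3 (x :: t) x [] hnd List.mem_cons_self, task8_alt_drop, he]
    simp
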